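-- pv_equiv track=rewrite | github.com/LiuTianjie/AES-python | multi_Num.py | multi_gcd
-- ===== SOURCE A (Python) =====
-- def multi_division(n1, n2, q=0):  # 多项式除法运算
--     if n1 < n2:
--         return 0, n1
--     elif n2 == 0:
--         return 0
--     else:
--         delta = len(bin(n1)) - len(bin(n2))
--         q += 1 << delta
--         r = (n2 << delta) ^ n1
--         if r >= n2:
--             return multi_division(r, n2, q)
--         else:
--             return q, r
--
-- def multi_gcd(n1, n2):  # 多项式求最大公因式(欧几里得算法)
--     if n1 == 0:
--         return n2
--     elif n2 == 0:
--         return n1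
--     if n1 - n2 >= 0:
--         n1 = multi_division(n1, n2)[1]
--         return multi_gcd(n1, n2)
--     else:  # s1比s2小，则将s1，s2互换，继续运算
--         n1, n2 = n2, n1
--         return multi_gcd(n1, n2)
-- ===== SOURCE B (Python) =====
-- def multi_gcd(n1, n2):  # GF(2) polynomial gcd: flat loop of single reduction steps
--     while n1 and n2:
--         if n1 < n2:
--             n1, n2 = n2, n1
--         n1 ^= n2 << (n1.bit_length() - n2.bit_length())
--     return n1 | n2
-- ===== Notes on version B (the rewrite author's own statement) =====
-- stated objective: simpler
-- what changed: A's mutual recursion (gcd calling a recursive quotient-and-remainder division helper that accumulates a quotient) is replaced by one flat loop that performs a single xor-reduction step per iteration (swap so n1>=n2, then n1 ^= n2 shifted to align leading bits) and returns n1|n2 when either is zero: no helper, no recursion, no quotient, no nested loop.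
import Mathlib
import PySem

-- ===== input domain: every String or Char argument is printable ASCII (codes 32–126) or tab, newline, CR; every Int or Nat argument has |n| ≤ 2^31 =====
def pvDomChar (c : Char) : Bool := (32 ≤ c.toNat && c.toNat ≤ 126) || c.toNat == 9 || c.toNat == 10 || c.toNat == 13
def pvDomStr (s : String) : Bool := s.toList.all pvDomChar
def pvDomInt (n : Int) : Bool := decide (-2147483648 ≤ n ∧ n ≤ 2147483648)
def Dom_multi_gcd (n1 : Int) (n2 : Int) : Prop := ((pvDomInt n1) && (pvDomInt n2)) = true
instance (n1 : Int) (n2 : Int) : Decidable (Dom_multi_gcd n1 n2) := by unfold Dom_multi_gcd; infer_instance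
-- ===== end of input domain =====

-- B replaces A's recursion (gcd calling a recursive quotient/remainder division helper) by one
-- flat loop doing a single xor-reduction step per iteration, returning n1|n2 at the end
-- (objective: simpler); return-value equivalence on Pre_.


-- ===== PORT A =====
-- len(bin(n)): '0b' prefix plus optional sign plus binary digits; exact for every int.
def pyBinLen (n : Int) : Nat :=
  if n < 0 then 3 + (if n.natAbs = 0 then 1 else n.natAbs.size)
  else 2 + (if n.natAbs = 0 then 1 else n.natAbs.size)

-- Python x ^ y for NONNEGATIVE operands (exact there; under Pre_ every xor either
-- program performs has nonnegative operands).
def pyXorNN (a b : Int) : Int := ((a.toNat ^^^ b.toNat : Nat) : Int)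

-- multi_division, transliterated; fuel makes the recursion total in Lean (the Python
-- recursion is unbounded outside Pre_); the fuel passed at the call site below is proved
-- sufficient, so the zero-fuel branch is never reached on Pre_ inputs.  In Python the
-- n2 == 0 branch returns the bare int 0 (multi_gcd would crash subscripting it); it is
-- unreachable from multi_gcd and modelled as (0, 0).  n2 << delta is n2 * 2 ^ delta.
def multi_division (fuel : Nat) (n1 : Int) (n2 : Int) (q : Int) : Int × Int :=
  match fuel with
  | 0 => (0, 0)
  | fuel + 1 =>
    if n1 < n2 then (0, n1)
    else if n2 = 0 then (0, 0)
    else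
      -- delta = len(bin(n1)) - len(bin(n2)): ≥ 0 whenever this branch is reached under Pre_
      let delta : Nat := pyBinLen n1 - pyBinLen n2
      let q := q + 2 ^ delta                 -- q += 1 << delta
      let r := pyXorNN (n2 * 2 ^ delta) n1   -- r = (n2 << delta) ^ n1
      if r ≥ n2 then multi_division fuel r n2 q else (q, r)

def multi_gcd_rec (fuel : Nat) (n1 : Int) (n2 : Int) : Int :=
  match fuel with
  | 0 => 0
  | fuel + 1 =>
    if n1 = 0 then n2
    else if n2 = 0 then n1
    else if n1 - n2 ≥ 0 then
      multi_gcd_rec fuel (multi_division (n1.toNat + 1) n1 n2 0).2 n2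
    else
      multi_gcd_rec fuel n2 n1

def multi_gcd (n1 : Int) (n2 : Int) : Int :=
  multi_gcd_rec (2 * (n1.toNat + n2.toNat) + 2) n1 n2

-- ===== PORT B =====
-- Python int.bit_length(); exact for every int.
def pyBitLen (n : Int) : Nat := n.natAbs.size

-- the single `while n1 and n2:` loop of Source B: conditional swap, then one xor-reduction
-- step n1 ^= n2 << (n1.bit_length() - n2.bit_length()); fuel is a loop counter, proved
-- sufficient on Pre_.  Final `n1 | n2` is Int lor (exact: some operand is 0 there).
def multi_gcd_loop (fuel : Nat) (n1 : Int) (n2 : Int) : Int :=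
  match fuel with
  | 0 => 0
  | fuel + 1 =>
    if n1 ≠ 0 ∧ n2 ≠ 0 then
      let a := if n1 < n2 then n2 else n1
      let b := if n1 < n2 then n1 else n2
      multi_gcd_loop fuel (pyXorNN a (b * 2 ^ (pyBitLen a - pyBitLen b))) b
    else Int.lor n1 n2   -- n1 | n2

def multi_gcd_alt (n1 : Int) (n2 : Int) : Int :=
  multi_gcd_loop (2 * (n1.toNat + n2.toNat) + 2) n1 n2

-- ===== PRECONDITION & SPEC =====
-- Pre_ excludes exactly the inputs where the Python A raises (ValueError from a negative
-- shift, or RecursionError): both arguments nonnegative, except that with n1 = 0 or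
-- n2 = 0 the other argument may be anything (A returns it before dividing).
def Pre_multi_gcd (n1 : Int) (n2 : Int) : Prop := (0 ≤ n1 ∧ 0 ≤ n2) ∨ n1 = 0 ∨ n2 = 0
instance (n1 : Int) (n2 : Int) : Decidable (Pre_multi_gcd n1 n2) := by unfold Pre_multi_gcd; infer_instance
def pvWitness_multi_gcd : Int × Int := (13, 7)

def Spec_multi_gcd (n1 : Int) (n2 : Int) (out : Int) : Prop := out = multi_gcd_alt n1 n2
instance (n1 : Int) (n2 : Int) (out : Int) : Decidable (Spec_multi_gcd n1 n2 out) := by unfold Spec_multi_gcd; infer_instance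

-- ===== CLAIM (what is proved, stated in full; the proofs are below) =====
def Claim_equal_multi_gcd : Prop := ∀ (n1 : Int) (n2 : Int), Dom_multi_gcd n1 n2 → Pre_multi_gcd n1 n2 → Spec_multi_gcd n1 n2 (multi_gcd n1 n2)

-- ===== LEMMAS AND PROOFS =====
theorem testBit_false_lt {x L : Nat} (hL : x < 2 ^ L) (hb : x.testBit (L - 1) = false) (hL1 : 1 ≤ L) :
    x < 2 ^ (L - 1) := by
  rw [Nat.testBit_eq_decide_div_mod_eq] at hb
  have hbd : ¬ (x / 2 ^ (L - 1) % 2 = 1) := of_decide_eq_false hb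
  have hLe : L = (L - 1) + 1 := by omega
  rw [hLe, pow_succ] at hL
  have h1 : x / 2 ^ (L - 1) < 2 := Nat.div_lt_of_lt_mul hL
  have h0 : x / 2 ^ (L - 1) = 0 := by
    generalize hq : x / 2 ^ (L - 1) = q at h1 hbd
    omega
  exact Nat.lt_of_div_eq_zero (by positivity) h0

theorem testBit_true_of {x L : Nat} (h1 : 2 ^ (L - 1) ≤ x) (h2 : x < 2 ^ L) (hL1 : 1 ≤ L) :
    x.testBit (L - 1) = true := by
  rw [Nat.testBit_eq_decide_div_mod_eq]
  have hLe : L = (L - 1) + 1 := by omega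
  rw [hLe, pow_succ] at h2
  have hlt : x / 2 ^ (L - 1) < 2 := Nat.div_lt_of_lt_mul h2
  have hge : 1 ≤ x / 2 ^ (L - 1) := (Nat.one_le_div_iff (by positivity)).2 h1
  have h1' : x / 2 ^ (L - 1) = 1 := by
    generalize hq : x / 2 ^ (L - 1) = q at hlt hge
    omega
  simp [h1']

theorem step_lt {a b : Nat} (hb : 0 < b) (hba : b ≤ a) :
    (b <<< (Nat.size a - Nat.size b)) ^^^ a < a := by
  set L := Nat.size a with hLdef
  have ha : 0 < a := lt_of_lt_of_le hb hba
  have hL1 : 1 ≤ L := by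
    rw [hLdef]
    rcases Nat.eq_zero_or_pos (Nat.size a) with h | h
    · exact absurd (Nat.size_eq_zero.mp h) (by omega)
    · exact h
  have hsz : Nat.size b ≤ L := Nat.size_le_size hba
  set m := b <<< (L - Nat.size b) with hm
  have hms : Nat.size m = L := by
    rw [hm, Nat.size_shiftLeft (by omega)]
    omega
  have hmlt : m < 2 ^ L := by rw [← hms]; exact Nat.lt_size_self m
  have halt : a < 2 ^ L := Nat.lt_size_self a
  have hmge : 2 ^ (L - 1) ≤ m := by
    have : L - 1 < Nat.size m := by omega
    exact Nat.lt_size.mp this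
  have hage : 2 ^ (L - 1) ≤ a := by
    have : L - 1 < Nat.size a := by omega
    exact Nat.lt_size.mp this
  have hxlt : m ^^^ a < 2 ^ L := Nat.xor_lt_two_pow hmlt halt
  have hxbit : (m ^^^ a).testBit (L - 1) = false := by
    rw [Nat.testBit_xor, testBit_true_of hmge hmlt hL1, testBit_true_of hage halt hL1]
    rfl
  calc m ^^^ a < 2 ^ (L - 1) := testBit_false_lt hxlt hxbit hL1
    _ ≤ a := hage

theorem pyXorNN_comm (a b : Int) : pyXorNN a b = pyXorNN b a := by
  simp [pyXorNN, Nat.xor_comm]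

theorem int_zero_lor (n : Int) : Int.lor 0 n = n := by
  cases n <;> simp [Int.lor, Nat.ldiff]

theorem int_lor_zero (n : Int) : Int.lor n 0 = n := by
  cases n <;> simp [Int.lor, Nat.ldiff]

-- A's delta and B's delta both equal the Nat.size difference when 0 < n2 ≤ r.
theorem binLen_delta (r n2 : Int) (h2 : 0 < n2) (h21 : n2 ≤ r) :
    pyBinLen r - pyBinLen n2 = Nat.size r.toNat - Nat.size n2.toNat := by
  have h1 : ¬ r < 0 := by omega
  have h1' : ¬ n2 < 0 := by omega
  have ha : r.natAbs = r.toNat := by omega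
  have hb : n2.natAbs = n2.toNat := by omega
  have ha0 : ¬ r.toNat = 0 := by omega
  have hb0 : ¬ n2.toNat = 0 := by omega
  simp only [pyBinLen, if_neg h1, if_neg h1', ha, hb, if_neg ha0, if_neg hb0]
  omega

theorem bitLen_delta (r n2 : Int) (h2 : 0 < n2) (h21 : n2 ≤ r) :
    pyBitLen r - pyBitLen n2 = Nat.size r.toNat - Nat.size n2.toNat := by
  have ha : r.natAbs = r.toNat := by omega
  have hb : n2.natAbs = n2.toNat := by omega
  simp only [pyBitLen, ha, hb]

-- the xor-reduction step on Ints: nonnegative and strictly below r (δ as a Nat.size difference)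
theorem int_step_lt (r n2 : Int) (h2 : 0 < n2) (h21 : n2 ≤ r) :
    0 ≤ pyXorNN (n2 * 2 ^ (Nat.size r.toNat - Nat.size n2.toNat)) r ∧
      pyXorNN (n2 * 2 ^ (Nat.size r.toNat - Nat.size n2.toNat)) r < r := by
  have hr : 0 < r := lt_of_lt_of_le h2 h21
  have hmul : (n2 * 2 ^ (Nat.size r.toNat - Nat.size n2.toNat)).toNat
      = n2.toNat <<< (Nat.size r.toNat - Nat.size n2.toNat) := by
    rw [Nat.shiftLeft_eq]
    have hp : (0:Int) ≤ 2 ^ (Nat.size r.toNat - Nat.size n2.toNat) := by positivity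
    rw [Int.toNat_mul (by omega) hp]
    have hpow : ((2:Int) ^ (Nat.size r.toNat - Nat.size n2.toNat)).toNat
        = 2 ^ (Nat.size r.toNat - Nat.size n2.toNat) := by
      rw [show (2:Int) = ((2:Nat):Int) from rfl, ← Nat.cast_pow, Int.toNat_natCast]
    rw [hpow]
  have hst : (n2.toNat <<< (Nat.size r.toNat - Nat.size n2.toNat)) ^^^ r.toNat < r.toNat :=
    step_lt (by omega) (by omega)
  constructor
  · simp only [pyXorNN]
    exact Int.natCast_nonneg _
  · simp only [pyXorNN, hmul]
    omega

-- the second component of multi_division lies in [0, n2) for any fuel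
theorem div_range : ∀ (f : Nat) (r n2 q : Int), 0 ≤ r → 0 < n2 →
    0 ≤ (multi_division f r n2 q).2 ∧ (multi_division f r n2 q).2 < n2 := by
  intro f
  induction f with
  | zero => intro r n2 q h1 h2; simp [multi_division]; omega
  | succ g ih =>
    intro r n2 q h1 h2
    rw [multi_division]
    by_cases hlt : r < n2
    · simp [hlt]; omega
    · have hge : n2 ≤ r := by omega
      have hn2 : ¬ n2 = 0 := by omega
      rw [binLen_delta r n2 h2 hge]
      have hs := int_step_lt r n2 h2 hge
      simp only [if_neg hlt, if_neg hn2]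
      by_cases hrge : pyXorNN (n2 * 2 ^ (Nat.size r.toNat - Nat.size n2.toNat)) r ≥ n2
      · simp only [if_pos hrge]
        exact ih _ n2 _ hs.1 h2
      · simp only [if_neg hrge]
        constructor
        · exact hs.1
        · omega

-- B's loop result does not depend on the fuel, once the fuel exceeds the measure
theorem loop_stable (μ : Nat) : ∀ (n1 n2 : Int) (f f' : Nat), 0 ≤ n1 → 0 ≤ n2 →
    n1.toNat + n2.toNat ≤ μ → μ < f → μ < f' →
    multi_gcd_loop f n1 n2 = multi_gcd_loop f' n1 n2 := by
  induction μ with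
  | zero =>
    intro n1 n2 f f' h1 h2 hμ hf hf'
    obtain ⟨g, rfl⟩ : ∃ g, f = g + 1 := ⟨f - 1, by omega⟩
    obtain ⟨g', rfl⟩ : ∃ g', f' = g' + 1 := ⟨f' - 1, by omega⟩
    have hz : n1 = 0 := by omega
    simp [multi_gcd_loop, hz]
  | succ m ih =>
    intro n1 n2 f f' h1 h2 hμ hf hf'
    obtain ⟨g, rfl⟩ : ∃ g, f = g + 1 := ⟨f - 1, by omega⟩
    obtain ⟨g', rfl⟩ : ∃ g', f' = g' + 1 := ⟨f' - 1, by omega⟩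
    rw [multi_gcd_loop, multi_gcd_loop]
    by_cases hc : n1 ≠ 0 ∧ n2 ≠ 0
    · simp only [if_pos hc]
      by_cases hlt : n1 < n2
      · simp only [if_pos hlt]
        have hs := int_step_lt n2 n1 (by omega) (by omega)
        rw [bitLen_delta n2 n1 (by omega) (by omega), pyXorNN_comm n2]
        exact ih _ n1 g g' hs.1 (by omega) (by omega) (by omega) (by omega)
      · simp only [if_neg hlt]
        have hs := int_step_lt n1 n2 (by omega) (by omega)
        rw [bitLen_delta n1 n2 (by omega) (by omega), pyXorNN_comm n1]
        exact ih _ n2 g g' hs.1 (by omega) (by omega) (by omega) (by omega)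
    · simp only [if_neg hc]

-- running B's loop across one full division of A: the loop from (r, n2) reaches (rem, n2)
theorem rem_sim (k : Nat) : ∀ (r n2 q : Int) (f1 : Nat), 0 ≤ r → 0 < n2 → n2 ≤ r →
    r.toNat ≤ k → k < f1 →
    multi_gcd_loop (r.toNat + n2.toNat + 1) r n2
      = multi_gcd_loop (((multi_division f1 r n2 q).2).toNat + n2.toNat + 1) (multi_division f1 r n2 q).2 n2 := by
  induction k with
  | zero => intro r n2 q f1 h1 h2 h21 hk hf; omega
  | succ k ih =>
    intro r n2 q f1 h1 h2 h21 hk hf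
    obtain ⟨g, rfl⟩ : ∃ g, f1 = g + 1 := ⟨f1 - 1, by omega⟩
    have hlt : ¬ r < n2 := by omega
    have hn2 : ¬ n2 = 0 := by omega
    have hs := int_step_lt r n2 h2 h21
    set s := pyXorNN (n2 * 2 ^ (Nat.size r.toNat - Nat.size n2.toNat)) r with hsdef
    have hA : multi_division (g + 1) r n2 q
        = if s ≥ n2 then multi_division g s n2 (q + 2 ^ (Nat.size r.toNat - Nat.size n2.toNat))
          else (q + 2 ^ (Nat.size r.toNat - Nat.size n2.toNat), s) := by
      rw [multi_division]
      simp only [if_neg hlt, if_neg hn2, binLen_delta r n2 h2 h21, ← hsdef]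
    have hB : multi_gcd_loop (r.toNat + n2.toNat + 1) r n2
        = multi_gcd_loop (r.toNat + n2.toNat) s n2 := by
      rw [multi_gcd_loop]
      have hc : r ≠ 0 ∧ n2 ≠ 0 := by constructor <;> omega
      simp only [if_pos hc, if_neg (show ¬ r < n2 from hlt)]
      rw [bitLen_delta r n2 h2 h21, pyXorNN_comm r, ← hsdef]
    have hB' : multi_gcd_loop (r.toNat + n2.toNat) s n2
        = multi_gcd_loop (s.toNat + n2.toNat + 1) s n2 :=
      loop_stable (s.toNat + n2.toNat) s n2 _ _ hs.1 (by omega) le_rfl (by omega) (by omega)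
    rw [hB, hB', hA]
    by_cases hrge : s ≥ n2
    · simp only [if_pos hrge]
      exact ih s n2 _ g hs.1 h2 hrge (by omega) (by omega)
    · simp only [if_neg hrge]

-- main simulation: A's recursion equals B's loop (with the canonical fuel)
theorem gcd_eq (μ : Nat) : ∀ (n1 n2 : Int) (f1 : Nat), 0 ≤ n1 → 0 ≤ n2 →
    2 * (n1.toNat + n2.toNat) + (if n1 < n2 then 1 else 0) ≤ μ → μ < f1 →
    multi_gcd_rec f1 n1 n2 = multi_gcd_loop (n1.toNat + n2.toNat + 1) n1 n2 := by
  induction μ with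
  | zero =>
    intro n1 n2 f1 h1 h2 hμ hf1
    obtain ⟨g, rfl⟩ : ∃ g, f1 = g + 1 := ⟨f1 - 1, by omega⟩
    have hz1 : n1 = 0 := by split at hμ <;> omega
    have hz2 : n2 = 0 := by split at hμ <;> omega
    simp [multi_gcd_rec, multi_gcd_loop, hz1, hz2, int_zero_lor]
  | succ m ih =>
    intro n1 n2 f1 h1 h2 hμ hf1
    obtain ⟨g, rfl⟩ : ∃ g, f1 = g + 1 := ⟨f1 - 1, by omega⟩
    rw [multi_gcd_rec]
    by_cases hz1 : n1 = 0
    · subst hz1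
      rw [multi_gcd_loop]
      simp [int_zero_lor]
    by_cases hz2 : n2 = 0
    · subst hz2
      rw [multi_gcd_loop]
      simp [hz1, int_lor_zero]
    have h2' : 0 < n2 := by omega
    by_cases hge : n1 - n2 ≥ 0
    · have hge' : n2 ≤ n1 := by omega
      simp only [if_neg hz1, if_neg hz2, if_pos hge]
      rw [rem_sim n1.toNat n1 n2 0 (n1.toNat + 1) h1 h2' hge' le_rfl (by omega)]
      set ρ := (multi_division (n1.toNat + 1) n1 n2 0).2 with hρ
      have hrng := div_range (n1.toNat + 1) n1 n2 0 h1 h2'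
      rw [← hρ] at hrng
      rw [if_neg (by omega : ¬ n1 < n2)] at hμ
      apply ih ρ n2 g hrng.1 h2 _ (by omega)
      rw [if_pos hrng.2]
      omega
    · have hlt : n1 < n2 := by omega
      simp only [if_neg hz1, if_neg hz2, if_neg hge]
      have hswap : multi_gcd_loop (n1.toNat + n2.toNat + 1) n1 n2
          = multi_gcd_loop (n2.toNat + n1.toNat + 1) n2 n1 := by
        rw [multi_gcd_loop, multi_gcd_loop]
        have hc : n1 ≠ 0 ∧ n2 ≠ 0 := ⟨hz1, hz2⟩
        have hc' : n2 ≠ 0 ∧ n1 ≠ 0 := ⟨hz2, hz1⟩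
        simp only [if_pos hc, if_pos hc', if_pos hlt, if_neg (show ¬ n2 < n1 by omega)]
        have hfe : n1.toNat + n2.toNat = n2.toNat + n1.toNat := by omega
        rw [hfe]
      rw [hswap]
      rw [if_pos hlt] at hμ
      apply ih n2 n1 g h2 h1 _ (by omega)
      rw [if_neg (show ¬ n2 < n1 by omega)]
      omega

theorem gcd_agree (n1 n2 : Int) (hpre : Pre_multi_gcd n1 n2) :
    multi_gcd n1 n2 = multi_gcd_alt n1 n2 := by
  unfold Pre_multi_gcd at hpre
  unfold multi_gcd multi_gcd_alt
  rcases hpre with ⟨h1, h2⟩ | hz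
  · rw [gcd_eq (2 * (n1.toNat + n2.toNat) + 1) n1 n2 _ h1 h2 (by split <;> omega) (by omega)]
    exact loop_stable (n1.toNat + n2.toNat) n1 n2 _ _ h1 h2 le_rfl (by omega) (by omega)
  · obtain ⟨g, hg⟩ : ∃ g, 2 * (n1.toNat + n2.toNat) + 2 = g + 1 := ⟨2 * (n1.toNat + n2.toNat) + 1, by omega⟩
    rw [hg, multi_gcd_rec, multi_gcd_loop]
    by_cases hz1 : n1 = 0
    · simp [hz1, int_zero_lor]
    · have hz2 : n2 = 0 := by tauto
      simp [hz1, hz2, int_lor_zero]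

-- ===== VERDICT (by name: the statement is the Claim_ definition above) =====
theorem multi_gcd_spec : Claim_equal_multi_gcd := by
  intro n1 n2 _ hpre
  exact gcd_agree n1 n2 hpre
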